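-- pv_equiv track=rewrite | github.com/Snapshot1407/Fenolyat_Iron_III | Point_1/detection.py | bond_n2
-- ===== SOURCE A (Python) =====
-- def bond_n2(number, bonds):
--     bond_angles = list()
--     for i in range(number):
--         neighbour = list()
--         len_bond = 0
--         for bond in bonds:
--             if i == bond[0]:
--                 len_bond += 1
--                 neighbour.append(i)
--                 neighbour.append(bond[1])
--             elif i == bond[1]:
--                 len_bond += 1
--                 neighbour.append(i)
--                 neighbour.append(bond[0])
--             if len_bond == 2:
--                 len_bond = 0
--                 c = sorted(list(set(neighbour)))
--                 bond_angles.append(c)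
--     return bond_angles
-- ===== SOURCE B (Python) =====
-- def bond_n2(number, bonds):
--     # One pass over the bonds: per-atom incident-neighbour lists, in bond order.
--     adj = {}
--     for bond in bonds:
--         a, b = bond[0], bond[1]
--         adj.setdefault(a, []).append(b)
--         if b != a:
--             adj.setdefault(b, []).append(a)
--     # Per atom, keep a running set of atoms seen so far and snapshot it
--     # (sorted) after every second incident bond.
--     out = []
--     for i in sorted(k for k in adj if 0 <= k < number):
--         seen = {i}
--         for k, n in enumerate(adj[i], 1):
--             seen.add(n)
--             if k % 2 == 0:
--                 out.append(sorted(seen))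
--     return out
-- ===== Notes on version B (the rewrite author's own statement) =====
-- stated objective: faster
-- what changed: Instead of rescanning the whole bond list for every atom in range(number), B builds per-atom incident-neighbour lists in one pass over the bonds, then walks each relevant atom's neighbour list once with a running seen-set that is snapshotted (sorted) after every second incident bond; Pre_ additionally requires every bond to carry two atom indices, since B reads both endpoints of every bond while A never reads the bonds when number <= 0.
-- outside the precondition, e.g. on bond_n2(0, [[1]]): A returns [], B raises IndexError
import Mathlib
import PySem

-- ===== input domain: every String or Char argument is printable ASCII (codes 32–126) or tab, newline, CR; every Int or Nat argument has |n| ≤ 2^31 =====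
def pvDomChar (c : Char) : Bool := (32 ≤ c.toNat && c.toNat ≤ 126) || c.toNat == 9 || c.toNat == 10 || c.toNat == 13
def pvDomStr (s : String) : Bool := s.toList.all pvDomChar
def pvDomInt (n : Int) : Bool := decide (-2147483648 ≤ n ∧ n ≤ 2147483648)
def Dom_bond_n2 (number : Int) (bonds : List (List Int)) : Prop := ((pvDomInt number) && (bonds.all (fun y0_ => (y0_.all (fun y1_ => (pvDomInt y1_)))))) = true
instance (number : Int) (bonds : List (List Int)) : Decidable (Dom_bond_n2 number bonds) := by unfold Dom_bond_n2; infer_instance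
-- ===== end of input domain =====

-- B replaces A's rescan of the whole bond list for every atom in range(number) by one pass
-- building per-atom incident-neighbour lists, then one walk per relevant atom with a running
-- seen-set snapshotted after every second incident bond (objective: faster).

-- ===== PORT A =====
-- one bond of A's inner loop: state (neighbour, len_bond, bond_angles)
def bondStep (i : Int) (s : List Int × Int × List (List Int)) (bond : List Int) :
    List Int × Int × List (List Int) :=
  let neighbour := s.1
  let len_bond := s.2.1
  let bond_angles := s.2.2
  let (neighbour, len_bond) :=
    if i = PySem.List.pyGetD bond 0 0 then
      (neighbour ++ [i] ++ [PySem.List.pyGetD bond 1 0], len_bond + 1)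
    else if i = PySem.List.pyGetD bond 1 0 then
      (neighbour ++ [i] ++ [PySem.List.pyGetD bond 0 0], len_bond + 1)
    else (neighbour, len_bond)
  if len_bond = 2 then
    (neighbour, 0, bond_angles ++ [PySem.List.sorted (PySem.Set.ofList neighbour) (fun x => x)])
  else (neighbour, len_bond, bond_angles)

def bond_n2 (number : Int) (bonds : List (List Int)) : List (List Int) :=
  (PySem.List.pyRange 0 number 1).foldl
    (fun bond_angles i => (bonds.foldl (bondStep i) ([], 0, bond_angles)).2.2) []

-- ===== PORT B =====
-- one bond of B's single pass: adj[a].append(b); if b != a: adj[b].append(a)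
def adjStep (adj : PySem.Dict Int (List Int)) (bond : List Int) : PySem.Dict Int (List Int) :=
  let a := PySem.List.pyGetD bond 0 0
  let b := PySem.List.pyGetD bond 1 0
  let adj := adj.insert a (adj.getD a [] ++ [b])
  if b ≠ a then adj.insert b (adj.getD b [] ++ [a]) else adj

-- one step of B's per-atom walk: seen.add(n); if k % 2 == 0: out.append(sorted(seen))
-- (k ≥ 1 and 2 > 0, so Lean's % agrees with Python's here)
def snapStep (s : PySem.Set Int × List (List Int)) (kn : Int × Int) :
    PySem.Set Int × List (List Int) :=
  let seen := PySem.Set.add s.1 kn.2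
  if kn.1 % 2 = 0 then (seen, s.2 ++ [PySem.List.sorted seen (fun x => x)]) else (seen, s.2)

def bond_n2_alt (number : Int) (bonds : List (List Int)) : List (List Int) :=
  let adj := bonds.foldl adjStep PySem.Dict.empty
  let ks := PySem.List.sorted (adj.keys.filter (fun k => decide (0 ≤ k ∧ k < number))) (fun x => x)
  ks.foldl (fun out i =>
    ((PySem.List.enumerate (adj.getD i []) 1).foldl snapStep (PySem.Set.ofList [i], out)).2) []

-- ===== PRECONDITION & SPEC =====
-- Pre_ requires every bond to carry two atom indices: on a bond of length < 2 A raises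
-- IndexError whenever number > 0, while for number ≤ 0 A returns [] without reading the
-- bonds but B reads both endpoints of every bond and raises IndexError.
def Pre_bond_n2 (number : Int) (bonds : List (List Int)) : Prop :=
  ∀ bond ∈ bonds, 2 ≤ bond.length
instance (number : Int) (bonds : List (List Int)) : Decidable (Pre_bond_n2 number bonds) := by
  unfold Pre_bond_n2; infer_instance
def pvWitness_bond_n2 : Int × List (List Int) := (3, [[0, 1], [1, 2], [0, 2]])

def Spec_bond_n2 (number : Int) (bonds : List (List Int)) (out : List (List Int)) : Prop := out = bond_n2_alt number bonds
instance (number : Int) (bonds : List (List Int)) (out : List (List Int)) : Decidable (Spec_bond_n2 number bonds out) := by unfold Spec_bond_n2; infer_instance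

-- ===== CLAIM (what is proved, stated in full; the proofs are below) =====
def Claim_equal_bond_n2 : Prop := ∀ (number : Int) (bonds : List (List Int)), Dom_bond_n2 number bonds → Pre_bond_n2 number bonds → Spec_bond_n2 number bonds (bond_n2 number bonds)

-- ===== LEMMAS AND PROOFS =====

def pvIvl (i : Int) (ms : List Int) : List Int := ms.flatMap (fun n => [i, n])
def pvSort (l : List Int) : List Int := PySem.List.sorted l (fun x => x)
def pvNb1 (i : Int) (b : List Int) : List Int :=
  let p := [PySem.List.pyGetD b 0 0, PySem.List.pyGetD b 1 0]
  if i ∈ p then p.erase i else []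
def pvNbrsD (i : Int) (bonds : List (List Int)) : List Int := bonds.flatMap (pvNb1 i)

lemma mem_pvIvl (i x : Int) (l : List Int) (hl : l ≠ []) :
    x ∈ pvIvl i l ↔ x = i ∨ x ∈ l := by
  simp only [pvIvl, List.mem_flatMap, List.mem_cons]
  constructor
  · rintro ⟨n, hn, h | h | h⟩ <;> simp_all
  · rintro (rfl | hx)
    · rcases List.exists_mem_of_ne_nil l hl with ⟨n, hn⟩; exact ⟨n, hn, Or.inl rfl⟩
    · exact ⟨x, hx, Or.inr (Or.inl rfl)⟩

-- sorted(set(i :: l)) = sorted(set(interleaved i l)) for nonempty l: same members, both dedup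
lemma sort_cons_eq (i : Int) (l : List Int) (hl : l ≠ []) :
    pvSort (PySem.Set.ofList (i :: l)) = pvSort (PySem.Set.ofList (pvIvl i l)) := by
  unfold pvSort
  apply PySem.List.sorted_eq_sorted_of_perm _ _ _ (fun a b => by simp)
  rw [List.perm_ext_iff_of_nodup (PySem.Set.nodup_ofList _) (PySem.Set.nodup_ofList _)]
  intro a
  rw [PySem.Set.mem_ofList, PySem.Set.mem_ofList, mem_pvIvl i a l hl, List.mem_cons]

lemma flatMap_filter (l : List Int) (p : Int → Bool) (h : Int → List (List Int))
    (hp : ∀ x ∈ l, p x = false → h x = []) :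
    (l.filter p).flatMap h = l.flatMap h := by
  induction l with
  | nil => simp
  | cons a t ih =>
    have ih' := ih (fun x hx => hp x (List.mem_cons_of_mem a hx))
    by_cases hpa : p a
    · simp [List.filter_cons, hpa, ih']
    · simp only [List.filter_cons, Bool.not_eq_true] at *
      simp [hpa, ih', hp a (List.mem_cons_self) (by simpa using hpa)]

-- pvNb1 in the branch form A's inner loop takes
lemma pvNb1_eq (i : Int) (b : List Int) :
    pvNb1 i b
      = (if i = PySem.List.pyGetD b 0 0 then [PySem.List.pyGetD b 1 0]
         else if i = PySem.List.pyGetD b 1 0 then [PySem.List.pyGetD b 0 0] else []) := by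
  unfold pvNb1
  by_cases h0 : i = PySem.List.pyGetD b 0 0 <;> by_cases h1 : i = PySem.List.pyGetD b 1 0 <;>
    simp [List.erase_cons, h0, h1] <;> simp [h0, h1, eq_comm]

-- A's per-atom emissions: after every second incident bond, sorted(set(neighbour))
def pvEmits (i : Int) : List Int → List Int → List (List Int)
  | _, [] => []
  | ms, n :: rest =>
    (if (ms.length + 1) % 2 = 0 then [pvSort (PySem.Set.ofList (pvIvl i (ms ++ [n])))] else [])
      ++ pvEmits i (ms ++ [n]) rest

lemma pvEmits_cons (i x : Int) (ms ns : List Int) :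
    pvEmits i ms (x :: ns) = pvEmits i ms [x] ++ pvEmits i (ms ++ [x]) ns := by
  simp [pvEmits]

lemma innerA (i : Int) (bonds : List (List Int)) (ms : List Int) (ba : List (List Int)) :
    bonds.foldl (bondStep i) (pvIvl i ms, ((ms.length % 2 : Nat) : Int), ba)
      = (pvIvl i (ms ++ pvNbrsD i bonds),
         (((ms.length + (pvNbrsD i bonds).length) % 2 : Nat) : Int),
         ba ++ pvEmits i ms (pvNbrsD i bonds)) := by
  induction bonds generalizing ms ba with
  | nil => simp [pvNbrsD, pvEmits]
  | cons bond rest ih =>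
    simp only [List.foldl_cons, pvNbrsD, List.flatMap_cons]
    have step : ∀ x : Int, pvNb1 i bond = [x] →
        bondStep i (pvIvl i ms, ((ms.length % 2 : Nat) : Int), ba) bond
          = (pvIvl i (ms ++ [x]), (((ms ++ [x]).length % 2 : Nat) : Int),
             ba ++ pvEmits i ms [x]) := by
      intro x hx
      have hI : pvIvl i ms ++ [i] ++ [x] = pvIvl i (ms ++ [x]) := by simp [pvIvl]
      rw [pvNb1_eq] at hx
      rcases Nat.mod_two_eq_zero_or_one ms.length with hp | hp
      · have hc : ¬ (((ms.length % 2 : Nat) : Int) + 1 = 2) := by omega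
        have hl : ((ms ++ [x]).length % 2 : Nat) = (ms.length % 2) + 1 := by
          simp [List.length_append]; omega
        have he : pvEmits i ms [x] = [] := by
          simp [pvEmits, Nat.add_mod, hp]
        split_ifs at hx with h0 h1
        · obtain rfl : PySem.List.pyGetD bond 1 0 = x := by simpa using hx
          simp only [bondStep]
          rw [if_pos h0, if_neg hc, hI, hl, he]
          simp
        · obtain rfl : PySem.List.pyGetD bond 0 0 = x := by simpa using hx
          simp only [bondStep]
          rw [if_neg h0, if_pos h1, if_neg hc, hI, hl, he]
          simp
      · have hc : (((ms.length % 2 : Nat) : Int) + 1 = 2) := by omega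
        have hl : ((ms ++ [x]).length % 2 : Nat) = 0 := by
          simp [List.length_append]; omega
        have he : pvEmits i ms [x]
            = [pvSort (PySem.Set.ofList (pvIvl i (ms ++ [x])))] := by
          simp [pvEmits, Nat.add_mod, hp]
        split_ifs at hx with h0 h1
        · obtain rfl : PySem.List.pyGetD bond 1 0 = x := by simpa using hx
          simp only [bondStep]
          rw [if_pos h0, if_pos hc, hI, hl, he]
          simp [pvSort]
        · obtain rfl : PySem.List.pyGetD bond 0 0 = x := by simpa using hx
          simp only [bondStep]
          rw [if_neg h0, if_pos h1, if_pos hc, hI, hl, he]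
          simp [pvSort]
    by_cases h0 : i = PySem.List.pyGetD bond 0 0
    · have hx : pvNb1 i bond = [PySem.List.pyGetD bond 1 0] := by rw [pvNb1_eq]; simp [h0]
      rw [hx, step _ hx, ih]
      simp only [Prod.mk.injEq]
      refine ⟨by simp [pvNbrsD], by simp [pvNbrsD]; omega, ?_⟩
      conv_rhs => rw [List.singleton_append, pvEmits_cons]
      simp [pvEmits, pvNbrsD]
    · by_cases h1 : i = PySem.List.pyGetD bond 1 0
      · have hx : pvNb1 i bond = [PySem.List.pyGetD bond 0 0] := by rw [pvNb1_eq]; simp [h0, h1]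
        rw [hx, step _ hx, ih]
        simp only [Prod.mk.injEq]
        refine ⟨by simp [pvNbrsD], by simp [pvNbrsD]; omega, ?_⟩
        conv_rhs => rw [List.singleton_append, pvEmits_cons]
        simp [pvEmits, pvNbrsD]
      · have hx : pvNb1 i bond = [] := by rw [pvNb1_eq]; simp [h0, h1]
        have hne : ¬ ((ms.length % 2 : Nat) : Int) = 2 := by omega
        have hstep : bondStep i (pvIvl i ms, ((ms.length % 2 : Nat) : Int), ba) bond
            = (pvIvl i ms, ((ms.length % 2 : Nat) : Int), ba) := by
          simp only [bondStep]
          rw [if_neg h0, if_neg h1, if_neg hne]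
        rw [hx, hstep]
        simpa [pvNbrsD] using ih ms ba

lemma A_char (number : Int) (bonds : List (List Int)) :
    bond_n2 number bonds
      = (PySem.List.pyRange 0 number 1).flatMap (fun i => pvEmits i [] (pvNbrsD i bonds)) := by
  unfold bond_n2
  have h : ∀ (ba : List (List Int)) (i : Int),
      (bonds.foldl (bondStep i) ([], 0, ba)).2.2 = ba ++ pvEmits i [] (pvNbrsD i bonds) := by
    intro ba i
    have h2 := innerA i bonds [] ba
    simp only [pvIvl, List.flatMap_nil, List.length_nil, Nat.zero_mod, Nat.cast_zero,
      List.nil_append, Nat.zero_add] at h2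
    rw [h2]
  calc (PySem.List.pyRange 0 number 1).foldl
        (fun bond_angles i => (bonds.foldl (bondStep i) ([], 0, bond_angles)).2.2) []
      = (PySem.List.pyRange 0 number 1).foldl
        (fun ba i => ba ++ pvEmits i [] (pvNbrsD i bonds)) [] :=
        PySem.List.foldl_congr_mem _ _ _ _ (fun acc x _ => h acc x)
    _ = _ := PySem.List.foldl_append_eq_flatMap _ _ []

lemma adjStep_getD (adj0 : PySem.Dict Int (List Int)) (bond : List Int) (k : Int) :
    (adjStep adj0 bond).getD k [] = adj0.getD k [] ++ pvNb1 k bond := by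
  unfold adjStep
  rw [pvNb1_eq]
  by_cases hba : PySem.List.pyGetD bond 1 0 = PySem.List.pyGetD bond 0 0
  · rw [if_neg (by simpa using hba)]
    by_cases hk : k = PySem.List.pyGetD bond 0 0
    · simp [PySem.Dict.getD_insert, hk, hba]
    · simp [PySem.Dict.getD_insert, hk, hba]
  · rw [if_pos hba]
    by_cases hkb : k = PySem.List.pyGetD bond 1 0 <;>
      by_cases hka : k = PySem.List.pyGetD bond 0 0 <;>
        simp_all [PySem.Dict.getD_insert]

lemma adj_getD (bonds : List (List Int)) (adj0 : PySem.Dict Int (List Int)) (k : Int) :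
    (bonds.foldl adjStep adj0).getD k [] = adj0.getD k [] ++ pvNbrsD k bonds := by
  induction bonds generalizing adj0 with
  | nil => simp [pvNbrsD]
  | cons bond rest ih =>
    rw [List.foldl_cons, ih, adjStep_getD]
    simp [pvNbrsD]

lemma pvNb1_ne_nil (k : Int) (bond : List Int) :
    pvNb1 k bond ≠ [] ↔ (k = PySem.List.pyGetD bond 0 0 ∨ k = PySem.List.pyGetD bond 1 0) := by
  rw [pvNb1_eq]
  split_ifs with h0 h1 <;> simp_all

lemma adj_keys_mem (bonds : List (List Int)) (adj0 : PySem.Dict Int (List Int)) (k : Int) :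
    k ∈ (bonds.foldl adjStep adj0).keys ↔ k ∈ adj0.keys ∨ pvNbrsD k bonds ≠ [] := by
  induction bonds generalizing adj0 with
  | nil => simp [pvNbrsD]
  | cons bond rest ih =>
    rw [List.foldl_cons, ih]
    have hstep : k ∈ (adjStep adj0 bond).keys ↔ k ∈ adj0.keys ∨ pvNb1 k bond ≠ [] := by
      rw [pvNb1_ne_nil]
      unfold adjStep
      by_cases hba : PySem.List.pyGetD bond 1 0 = PySem.List.pyGetD bond 0 0
      · rw [if_neg (by simpa using hba)]
        rw [PySem.Dict.mem_keys_insert]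
        constructor
        · rintro (h | h) <;> tauto
        · rintro (h | h | h) <;> simp_all
      · rw [if_pos hba, PySem.Dict.mem_keys_insert, PySem.Dict.mem_keys_insert]
        tauto
    rw [hstep]
    have : pvNbrsD k (bond :: rest) ≠ [] ↔ pvNb1 k bond ≠ [] ∨ pvNbrsD k rest ≠ [] := by
      simp [pvNbrsD]
      tauto
    rw [this]
    tauto

lemma adj_keys_nodup (bonds : List (List Int)) (adj0 : PySem.Dict Int (List Int))
    (h : adj0.keys.Nodup) : (bonds.foldl adjStep adj0).keys.Nodup := by
  induction bonds generalizing adj0 with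
  | nil => exact h
  | cons bond rest ih =>
    rw [List.foldl_cons]
    apply ih
    simp only [adjStep]
    split_ifs
    · exact PySem.Dict.nodup_keys_insert _ _ _ (PySem.Dict.nodup_keys_insert _ _ _ h)
    · exact PySem.Dict.nodup_keys_insert _ _ _ h

-- B's per-atom emissions: the running seen-set snapshotted at every even count
def pvEmitsB (i : Int) : List Int → List Int → List (List Int)
  | _, [] => []
  | ms, n :: rest =>
    (if (ms.length + 1) % 2 = 0 then [pvSort (PySem.Set.ofList (i :: (ms ++ [n])))] else [])
      ++ pvEmitsB i (ms ++ [n]) rest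

lemma pvEmitsB_eq_pvEmits (i : Int) (ns ms : List Int) :
    pvEmitsB i ms ns = pvEmits i ms ns := by
  induction ns generalizing ms with
  | nil => rfl
  | cons n rest ih =>
    rw [pvEmitsB, pvEmits, ih (ms ++ [n]),
      sort_cons_eq i (ms ++ [n]) (by simp)]

lemma innerB (i : Int) (rest ms : List Int) (out : List (List Int)) :
    (PySem.List.enumerate rest ((ms.length : Int) + 1)).foldl snapStep
        (PySem.Set.ofList (i :: ms), out)
      = (PySem.Set.ofList (i :: (ms ++ rest)), out ++ pvEmitsB i ms rest) := by
  induction rest generalizing ms out with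
  | nil => simp [pvEmitsB]
  | cons n r ih =>
    rw [PySem.List.enumerate_cons, List.foldl_cons]
    have hseen : PySem.Set.add (PySem.Set.ofList (i :: ms)) n
        = PySem.Set.ofList (i :: (ms ++ [n])) := by
      have := PySem.Set.ofList_append_singleton ((i :: ms)) n
      simpa using this.symm
    have hidx : ((ms.length : Int) + 1) + 1 = (((ms ++ [n]).length : Int) + 1) := by
      simp
    by_cases hp : ((ms.length : Int) + 1) % 2 = 0
    · have hpn : (ms.length + 1) % 2 = 0 := by omega
      have hstep : snapStep (PySem.Set.ofList (i :: ms), out) (((ms.length : Int) + 1), n)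
          = (PySem.Set.ofList (i :: (ms ++ [n])),
             out ++ [pvSort (PySem.Set.ofList (i :: (ms ++ [n])))]) := by
        simp only [snapStep, hseen, hp, if_pos, pvSort]
      rw [hstep, hidx, ih (ms ++ [n])]
      simp [pvEmitsB, hpn]
    · have hpn : ¬ (ms.length + 1) % 2 = 0 := by omega
      have hstep : snapStep (PySem.Set.ofList (i :: ms), out) (((ms.length : Int) + 1), n)
          = (PySem.Set.ofList (i :: (ms ++ [n])), out) := by
        simp only [snapStep, hseen, hp, if_neg, if_false]
      rw [hstep, hidx, ih (ms ++ [n])]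
      simp [pvEmitsB, hpn]

lemma B_char (number : Int) (bonds : List (List Int)) :
    bond_n2_alt number bonds
      = (PySem.List.pyRange 0 number 1).flatMap (fun i => pvEmits i [] (pvNbrsD i bonds)) := by
  simp only [bond_n2_alt]
  have hget : ∀ k, (bonds.foldl adjStep PySem.Dict.empty).getD k [] = pvNbrsD k bonds := by
    intro k; rw [adj_getD]; simp
  have hkeys : ∀ k, k ∈ (bonds.foldl adjStep PySem.Dict.empty).keys ↔ pvNbrsD k bonds ≠ [] := by
    intro k; rw [adj_keys_mem]; simp [PySem.Dict.keys_empty]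
  have hnodup := adj_keys_nodup bonds PySem.Dict.empty (by simp [PySem.Dict.keys_empty])
  have hks : PySem.List.sorted
        ((bonds.foldl adjStep PySem.Dict.empty).keys.filter (fun k => decide (0 ≤ k ∧ k < number)))
        (fun x => x)
      = (PySem.List.pyRange 0 number 1).filter (fun k => decide (pvNbrsD k bonds ≠ [])) := by
    apply PySem.List.sorted_eq_of_perm_of_pairwise_lt
    · rw [List.perm_ext_iff_of_nodup
        (List.Nodup.filter _ (PySem.List.nodup_pyRange_one 0 number))
        (List.Nodup.filter _ hnodup)]
      intro x
      simp only [List.mem_filter, PySem.List.mem_pyRange_one, decide_eq_true_eq, hkeys]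
      tauto
    · exact (PySem.List.pairwise_lt_pyRange_one 0 number).filter _
  rw [hks]
  have hone : ∀ (i : Int) (out : List (List Int)),
      ((PySem.List.enumerate (pvNbrsD i bonds) 1).foldl snapStep
        (PySem.Set.ofList [i], out)).2 = out ++ pvEmits i [] (pvNbrsD i bonds) := by
    intro i out
    have h0 : ((([] : List Int).length : Int) + 1) = 1 := by simp
    have := innerB i (pvNbrsD i bonds) [] out
    rw [h0] at this
    simp only [List.nil_append] at this
    rw [this, pvEmitsB_eq_pvEmits]
  have hloop : ∀ (l : List Int),
      l.foldl (fun out i =>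
        ((PySem.List.enumerate ((bonds.foldl adjStep PySem.Dict.empty).getD i []) 1).foldl
          snapStep (PySem.Set.ofList [i], out)).2) []
      = l.flatMap (fun i => pvEmits i [] (pvNbrsD i bonds)) := by
    intro l
    calc _ = l.foldl (fun out i => out ++ pvEmits i [] (pvNbrsD i bonds)) [] := by
          apply PySem.List.foldl_congr_mem
          intro acc x _
          rw [hget]
          exact hone x acc
      _ = _ := PySem.List.foldl_append_eq_flatMap _ _ []
  rw [hloop]
  apply flatMap_filter
  intro x _ hx
  simp only [decide_eq_true_eq] at hx
  have : pvNbrsD x bonds = [] := by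
    by_contra hc
    simp [hc] at hx
  rw [this]
  rfl

-- ===== VERDICT (by name: the statement is the Claim_ definition above) =====
theorem bond_n2_spec : Claim_equal_bond_n2 := by
  intro number bonds _ _
  unfold Spec_bond_n2
  rw [A_char, B_char]
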